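-- pv_equiv track=rewrite | github.com/Seaverhall10/ancient-texts-app | agents/reader.py | get_texts_for_target
-- ===== SOURCE A (Python) =====
-- def get_texts_for_target(target, manifest):
--     """Resolve --text argument to a list of text_ids."""
--     if target == 'all':
--         return [t['id'] for t in manifest['texts']]
--     if target in ('ot', 'oldtestament'):
--         return [t['id'] for t in manifest['texts'] if t.get('category') == 'ot']
--     if target in ('nt', 'newtestament'):
--         return [t['id'] for t in manifest['texts'] if t.get('category') == 'nt']
--     return [target]
-- ===== SOURCE B (Python) =====
-- def get_texts_for_target(target, manifest):
--     """Resolve --text argument to a list of text_ids."""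
--     if target == 'all':
--         selected = manifest['texts']
--     else:
--         cat = {'ot': 'ot', 'oldtestament': 'ot',
--                'nt': 'nt', 'newtestament': 'nt'}.get(target)
--         if cat is None:
--             return [target]
--         groups = {}
--         for t in manifest['texts']:
--             groups.setdefault(t.get('category'), []).append(t)
--         selected = groups.get(cat, [])
--     return [t['id'] for t in selected]
-- ===== Notes on version B (the rewrite author's own statement) =====
-- stated objective: alternative
-- what changed: Instead of three branch-specific filtered comprehensions, B groups manifest['texts'] into a category->texts index dict in one pass, answers alias targets by a single group lookup, and extracts ids in one shared final pass.
import Mathlib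
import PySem

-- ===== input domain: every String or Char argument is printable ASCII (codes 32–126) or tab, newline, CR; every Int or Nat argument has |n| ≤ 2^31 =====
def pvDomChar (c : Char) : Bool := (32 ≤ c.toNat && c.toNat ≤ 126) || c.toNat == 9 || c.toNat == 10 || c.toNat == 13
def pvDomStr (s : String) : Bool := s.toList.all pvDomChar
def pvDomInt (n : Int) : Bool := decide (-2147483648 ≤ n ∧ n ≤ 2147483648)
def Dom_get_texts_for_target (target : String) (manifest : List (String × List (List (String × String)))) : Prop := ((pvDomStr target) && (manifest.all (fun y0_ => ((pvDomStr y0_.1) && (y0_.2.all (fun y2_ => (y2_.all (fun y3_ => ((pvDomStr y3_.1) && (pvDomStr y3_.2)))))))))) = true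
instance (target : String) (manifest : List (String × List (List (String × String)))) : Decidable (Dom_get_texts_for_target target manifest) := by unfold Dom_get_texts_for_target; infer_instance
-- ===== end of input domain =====

-- B groups manifest['texts'] by category into a dict-of-lists index once and answers alias
-- targets by one group lookup plus one shared id-extraction pass (objective: alternative).

-- Assoc-list lookup, first match = Python dict lookup under the type convention.
def pvLookup? (d : List (String × String)) (k : String) : Option String :=
  (d.find? (fun p => p.1 == k)).map (·.2)

-- manifest['texts'] (none = KeyError, excluded by Pre_)
def pvTexts? (manifest : List (String × List (List (String × String)))) :
    Option (List (List (String × String))) :=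
  (manifest.find? (fun p => p.1 == "texts")).map (·.2)

-- ===== PORT A =====
def get_texts_for_target (target : String) (manifest : List (String × List (List (String × String)))) : List String :=
  if target = "all" then
    ((pvTexts? manifest).getD []).map (fun t => (pvLookup? t "id").getD "")
  else if target = "ot" ∨ target = "oldtestament" then
    (((pvTexts? manifest).getD []).filter (fun t => pvLookup? t "category" == some "ot")).map
      (fun t => (pvLookup? t "id").getD "")
  else if target = "nt" ∨ target = "newtestament" then
    (((pvTexts? manifest).getD []).filter (fun t => pvLookup? t "category" == some "nt")).map
      (fun t => (pvLookup? t "id").getD "")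
  else [target]

-- ===== PORT B =====
-- {'ot':'ot','oldtestament':'ot','nt':'nt','newtestament':'nt'}.get(target)
def pvAliasCat (target : String) : Option String :=
  pvLookup? [("ot", "ot"), ("oldtestament", "ot"), ("nt", "nt"), ("newtestament", "nt")] target

-- the grouping loop: groups.setdefault(t.get('category'), []).append(t)
def pvGroups (texts : List (List (String × String))) :
    PySem.Dict (Option String) (List (List (String × String))) :=
  (texts.map (fun t => (pvLookup? t "category", t))).foldl
    (fun d p => d.modify p.1 [] (· ++ [p.2])) PySem.Dict.empty

def get_texts_for_target_alt (target : String) (manifest : List (String × List (List (String × String)))) : List String :=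
  (if target = "all" then
    some ((pvTexts? manifest).getD [])
  else
    match pvAliasCat target with
    | none => none
    | some cat => some ((pvGroups ((pvTexts? manifest).getD [])).getD (some cat) [])
  ).elim [target] (fun selected => selected.map (fun t => (pvLookup? t "id").getD ""))

-- ===== PRECONDITION & SPEC =====
-- Pre_ excludes exactly the inputs where Python A raises KeyError: an 'all'/'ot'/'nt'-alias
-- target with no 'texts' key, or a selected text entry lacking an 'id' key.
def Pre_get_texts_for_target (target : String) (manifest : List (String × List (List (String × String)))) : Prop :=
  (target = "all" ∨ target = "ot" ∨ target = "oldtestament" ∨ target = "nt" ∨ target = "newtestament") →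
    ((pvTexts? manifest).isSome = true ∧
     ∀ t ∈ (pvTexts? manifest).getD [],
       (target = "all" ∨
        pvLookup? t "category" =
          some (if target = "ot" ∨ target = "oldtestament" then "ot" else "nt")) →
       (pvLookup? t "id").isSome = true)
instance (target : String) (manifest : List (String × List (List (String × String)))) : Decidable (Pre_get_texts_for_target target manifest) := by unfold Pre_get_texts_for_target; infer_instance

def pvWitness_get_texts_for_target : String × (List (String × List (List (String × String)))) :=
  ("all", [("texts", [[("id", "genesis"), ("category", "ot")], [("id", "mark"), ("category", "nt")]])])

def Spec_get_texts_for_target (target : String) (manifest : List (String × List (List (String × String)))) (out : List String) : Prop := out = get_texts_for_target_alt target manifest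
instance (target : String) (manifest : List (String × List (List (String × String)))) (out : List String) : Decidable (Spec_get_texts_for_target target manifest out) := by unfold Spec_get_texts_for_target; infer_instance

-- ===== CLAIM (what is proved, stated in full; the proofs are below) =====
def Claim_equal_get_texts_for_target : Prop := ∀ (target : String) (manifest : List (String × List (List (String × String)))), Dom_get_texts_for_target target manifest → Pre_get_texts_for_target target manifest → Spec_get_texts_for_target target manifest (get_texts_for_target target manifest)

-- ===== LEMMAS AND PROOFS =====
-- the group at key 'some cat' is exactly A's filtered list
theorem pvGroups_getD (texts : List (List (String × String))) (cat : String) :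
    (pvGroups texts).getD (some cat) [] =
      texts.filter (fun t => pvLookup? t "category" == some cat) := by
  unfold pvGroups
  rw [PySem.Dict.getD_foldl_modify_append]
  simp [List.filter_map, Function.comp_def]

theorem pvAliasCat_none (target : String) (h2 : ¬ target = "ot") (h3 : ¬ target = "oldtestament")
    (h4 : ¬ target = "nt") (h5 : ¬ target = "newtestament") : pvAliasCat target = none := by
  have e2 : ("ot" == target) = false := beq_eq_false_iff_ne.mpr (Ne.symm h2)
  have e3 : ("oldtestament" == target) = false := beq_eq_false_iff_ne.mpr (Ne.symm h3)
  have e4 : ("nt" == target) = false := beq_eq_false_iff_ne.mpr (Ne.symm h4)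
  have e5 : ("newtestament" == target) = false := beq_eq_false_iff_ne.mpr (Ne.symm h5)
  simp [pvAliasCat, pvLookup?, List.find?, e2, e3, e4, e5]

-- ===== VERDICT (by name: the statement is the Claim_ definition above) =====
theorem get_texts_for_target_spec : Claim_equal_get_texts_for_target := by
  intro target manifest _ _
  unfold Spec_get_texts_for_target get_texts_for_target get_texts_for_target_alt
  by_cases h1 : target = "all"
  · simp [h1]
  by_cases h2 : target = "ot"
  · subst h2; simp [pvAliasCat, pvLookup?, pvGroups_getD]
  by_cases h3 : target = "oldtestament"
  · subst h3; simp [pvAliasCat, pvLookup?, pvGroups_getD]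
  by_cases h4 : target = "nt"
  · subst h4; simp [pvAliasCat, pvLookup?, pvGroups_getD]
  by_cases h5 : target = "newtestament"
  · subst h5; simp [pvAliasCat, pvLookup?, pvGroups_getD]
  · simp [h1, h2, h3, h4, h5, pvAliasCat_none target h2 h3 h4 h5]
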